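-- pv_equiv track=rewrite | github.com/pypi-data/pypi-mirror-119 | packages/rappf/rappf-0.1.tar.gz/rappf-0.1/src/rappf/art.py | _art
-- ===== SOURCE A (Python) =====
-- import itertools
-- from typing import (
--     Callable,
--     Dict,
--     Hashable,
--     Iterable,
--     Iterator,
--     List,
--     Mapping,
--     Optional,
--     Sequence,
--     Tuple,
--     TypeVar,
-- )
--
-- def _above_has_successor_to_the_right(
--     row: int,
--     col: int,
--     successor_lists: Mapping[int, Iterable[int]],
-- ) -> Optional[int]:
--     successors = itertools.chain.from_iterable(
--         successor_lists.get(predecessor, []) for predecessor in range(row)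
--     )
--     try:
--         return col < max(successors)
--     except ValueError:
--         return False
--
-- def _art(
--     names: Sequence[str],
--     predecessor_lists: Mapping[int, Iterable[int]],
--     successor_lists: Mapping[int, Iterable[int]],
--     max_width: int,
-- ) -> Iterator[str]:
--     col_widths = [min(max_width, len(x)) for x in names]
--     for row in range(len(names)):
--         successors = successor_lists.get(row, [])
--         if row:
--             yield "\n"
--         for col in range(len(names)):
--             predecessors = predecessor_lists.get(col, [])
--             col_width = col_widths[col]
--
--             if col < row:
--                 ll = lr = cc = rr = " "
--             elif row == col:
--                 if predecessors:
--                     ll = "+"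
--                     lr = "-"
--                 else:
--                     ll = lr = " "
--
--                 cc = names[row]
--
--                 if successors:
--                     rr = "-"
--                 elif _above_has_successor_to_the_right(row, col, successor_lists):
--                     rr = " "
--                 else:
--                     rr = ""
--             else:
--                 if row in predecessors:
--                     ll = "+"
--                 elif predecessors and min(predecessors) < row:
--                     ll = "|"
--                 elif successors and col < max(successors):
--                     ll = "-"
--                 elif _above_has_successor_to_the_right(row, col, successor_lists):
--                     ll = " "
--                 else:
--                     ll = ""
--
--                 if successors and col < max(successors):
--                     lr = cc = rr = "-"
--                 elif _above_has_successor_to_the_right(row, col, successor_lists):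
--                     lr = cc = rr = " "
--                 else:
--                     lr = cc = rr = ""
--
--             if col:
--                 yield ll
--                 yield lr
--             yield lr * (col_width - len(cc)) + cc[:col_width]
--             yield rr
-- ===== SOURCE B (Python) =====
-- def _art(names, predecessor_lists, successor_lists, max_width):
--     # Precompute per-row and per-column data once, so each grid cell is O(1)
--     # (A rescans all earlier rows' successor lists for every cell).
--     n = len(names)
--     col_widths = [min(max_width, len(x)) for x in names]
--     # prefs[r] = max successor over rows 0..r-1 (None if none) -- prefix scan
--     prefs = []
--     cur = None
--     for r in range(n):
--         prefs.append(cur)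
--         s = list(successor_lists.get(r, []))
--         if s:
--             m = max(s)
--             if cur is None or m > cur:
--                 cur = m
--     smax = [max(s) if s else None
--             for s in (list(successor_lists.get(r, [])) for r in range(n))]
--     preds = [list(predecessor_lists.get(c, [])) for c in range(n)]
--     pmins = [min(p) if p else None for p in preds]
--     psets = [set(p) for p in preds]
--     out = []
--     for row in range(n):
--         if row:
--             out.append("\n")
--         sm = smax[row]
--         pf = prefs[row]
--         for col in range(n):
--             cw = col_widths[col]
--             if col < row:
--                 ll = lr = cc = rr = " "
--             elif row == col:
--                 if preds[col]:
--                     ll, lr = "+", "-"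
--                 else:
--                     ll = lr = " "
--                 cc = names[row]
--                 if sm is not None:
--                     rr = "-"
--                 elif pf is not None and col < pf:
--                     rr = " "
--                 else:
--                     rr = ""
--             else:
--                 reach = sm is not None and col < sm
--                 above = pf is not None and col < pf
--                 if row in psets[col]:
--                     ll = "+"
--                 elif pmins[col] is not None and pmins[col] < row:
--                     ll = "|"
--                 elif reach:
--                     ll = "-"
--                 elif above:
--                     ll = " "
--                 else:
--                     ll = ""
--                 lr = cc = rr = "-" if reach else (" " if above else "")
--             if col:
--                 out.append(ll)
--                 out.append(lr)
--             out.append(lr * (cw - len(cc)) + cc[:cw])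
--             out.append(rr)
--     yield from out
-- ===== Notes on version B (the rewrite author's own statement) =====
-- stated objective: faster
-- what changed: B precomputes, in one pass each, per-row prefix maxima of all earlier rows' successors (replacing A's per-cell _above_has_successor_to_the_right rescan of every earlier row's successor list), per-row successor maxima, and per-column predecessor lists/minima/sets, so every one of the n^2 grid cells is computed in O(1) instead of O(n+m).
import Mathlib
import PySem

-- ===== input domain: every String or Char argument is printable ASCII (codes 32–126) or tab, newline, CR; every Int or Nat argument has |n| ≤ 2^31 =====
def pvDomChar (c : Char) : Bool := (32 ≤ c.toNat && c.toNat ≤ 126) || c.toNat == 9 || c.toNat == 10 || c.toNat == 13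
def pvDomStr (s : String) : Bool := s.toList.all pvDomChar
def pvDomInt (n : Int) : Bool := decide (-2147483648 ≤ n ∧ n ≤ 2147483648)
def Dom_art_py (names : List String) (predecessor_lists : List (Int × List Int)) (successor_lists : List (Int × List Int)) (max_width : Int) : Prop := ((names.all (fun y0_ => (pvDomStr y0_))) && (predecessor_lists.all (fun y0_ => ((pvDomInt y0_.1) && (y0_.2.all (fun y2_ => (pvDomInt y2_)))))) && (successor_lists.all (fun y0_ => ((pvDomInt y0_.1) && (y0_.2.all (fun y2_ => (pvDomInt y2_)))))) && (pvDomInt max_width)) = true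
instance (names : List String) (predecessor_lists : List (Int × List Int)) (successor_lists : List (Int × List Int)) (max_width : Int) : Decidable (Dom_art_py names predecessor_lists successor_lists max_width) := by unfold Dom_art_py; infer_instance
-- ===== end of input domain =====

-- B replaces A's per-cell rescans (the `_above_has_successor_to_the_right` scan over all earlier
-- rows, and the per-cell dict lookups / min / max) by per-row prefix maxima and per-column data
-- precomputed once, making each of the n^2 cells O(1); same yielded pieces, proved equal.

-- ===== PORT A =====
-- port of `_above_has_successor_to_the_right`
def pvAbove (row col : Int) (successor_lists : List (Int × List Int)) : Bool :=
  let successors := (PySem.List.pyRange 0 row).flatMap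
      (fun predecessor => (PySem.Dict.mk successor_lists).getD predecessor [])
  match PySem.List.max? successors (fun x => x) with
  | some m => decide (col < m)
  | none => false

-- one grid cell of A: the strings A yields for (row, col), in order
def pvCellA (names : List String) (predecessor_lists successor_lists : List (Int × List Int))
    (col_widths : List Int) (successors : List Int) (row col : Nat) : List String :=
  let predecessors := (PySem.Dict.mk predecessor_lists).getD (col : Int) []
  let col_width := col_widths.getD col 0
  let q : String × String × String × String :=
    if col < row then (" ", " ", " ", " ")
    else if row = col then
      let p : String × String := if predecessors ≠ [] then ("+", "-") else (" ", " ")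
      let cc := names.getD row ""
      let rr := if successors ≠ [] then "-"
                else if pvAbove (row : Int) (col : Int) successor_lists then " " else ""
      (p.1, p.2, cc, rr)
    else
      let ll :=
        if predecessors.contains ((row : Nat) : Int) then "+"
        else if !predecessors.isEmpty &&
            (match PySem.List.min? predecessors (fun x => x) with
             | some m => decide (m < (row : Int)) | none => false) then "|"
        else if !successors.isEmpty &&
            (match PySem.List.max? successors (fun x => x) with
             | some m => decide ((col : Int) < m) | none => false) then "-"
        else if pvAbove (row : Int) (col : Int) successor_lists then " " else ""
      let x :=
        if !successors.isEmpty &&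
            (match PySem.List.max? successors (fun x => x) with
             | some m => decide ((col : Int) < m) | none => false) then "-"
        else if pvAbove (row : Int) (col : Int) successor_lists then " " else ""
      (ll, x, x, x)
  (if col ≠ 0 then [q.1, q.2.1] else []) ++
  [String.ofList (PySem.List.pyRepeat q.2.1.toList (col_width - PySem.Str.len q.2.2.1) ++
      (PySem.Str.slice q.2.2.1 none (some col_width)).toList), q.2.2.2]

def art_py (names : List String) (predecessor_lists : List (Int × List Int)) (successor_lists : List (Int × List Int)) (max_width : Int) : List String :=
  let col_widths := names.map (fun x => min max_width (PySem.Str.len x))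
  (List.range names.length).foldl (fun acc (row : Nat) =>
    let successors := (PySem.Dict.mk successor_lists).getD (row : Int) []
    let acc := if row ≠ 0 then acc ++ ["\n"] else acc
    (List.range names.length).foldl (fun a col =>
      a ++ pvCellA names predecessor_lists successor_lists col_widths successors row col) acc) []

-- ===== PORT B =====
-- one grid cell of B, from the precomputed per-row (sm, pf) and per-column (preds, pmins, psets) data
def pvCellB (names : List String) (col_widths : List Int) (preds : List (List Int))
    (pmins : List (Option Int)) (psets : List (PySem.Set Int)) (sm pf : Option Int)
    (row col : Nat) : List String :=
  let cw := col_widths.getD col 0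
  let q : String × String × String × String :=
    if col < row then (" ", " ", " ", " ")
    else if row = col then
      let p : String × String := if preds.getD col [] ≠ [] then ("+", "-") else (" ", " ")
      let cc := names.getD row ""
      let rr := match sm with
                | some _ => "-"
                | none => match pf with
                          | some m => if (col : Int) < m then " " else ""
                          | none => ""
      (p.1, p.2, cc, rr)
    else
      let reach := match sm with | some m => decide ((col : Int) < m) | none => false
      let above := match pf with | some m => decide ((col : Int) < m) | none => false
      let ll :=
        if decide (((row : Nat) : Int) ∈ psets.getD col PySem.Set.empty) then "+"
        else if (match pmins.getD col none with
                 | some m => decide (m < (row : Int)) | none => false) then "|"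
        else if reach then "-"
        else if above then " "
        else ""
      let x := if reach then "-" else if above then " " else ""
      (ll, x, x, x)
  (if col ≠ 0 then [q.1, q.2.1] else []) ++
  [String.ofList (PySem.List.pyRepeat q.2.1.toList (cw - PySem.Str.len q.2.2.1) ++
      (PySem.Str.slice q.2.2.1 none (some cw)).toList), q.2.2.2]

def art_py_alt (names : List String) (predecessor_lists : List (Int × List Int)) (successor_lists : List (Int × List Int)) (max_width : Int) : List String :=
  let n := names.length
  let col_widths := names.map (fun x => min max_width (PySem.Str.len x))
  -- prefix scan: prefs[r] = running max of all successors of rows 0..r-1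
  let prefs := ((List.range n).foldl (fun (st : List (Option Int) × Option Int) (r : Nat) =>
      (st.1 ++ [st.2],
       match PySem.List.max? ((PySem.Dict.mk successor_lists).getD (r : Int) []) (fun x => x) with
       | none => st.2
       | some m => match st.2 with
                   | none => some m
                   | some c => if m > c then some m else some c)) ([], none)).1
  let smax := (List.range n).map (fun (r : Nat) =>
      PySem.List.max? ((PySem.Dict.mk successor_lists).getD (r : Int) []) (fun x => x))
  let preds := (List.range n).map (fun (c : Nat) => (PySem.Dict.mk predecessor_lists).getD (c : Int) [])
  let pmins := preds.map (fun p => PySem.List.min? p (fun x => x))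
  let psets := preds.map (fun p => PySem.Set.ofList p)
  (List.range n).foldl (fun out row =>
    let out := if row ≠ 0 then out ++ ["\n"] else out
    (List.range n).foldl (fun o col =>
      o ++ pvCellB names col_widths preds pmins psets (smax.getD row none) (prefs.getD row none) row col) out) []

-- ===== PRECONDITION & SPEC =====
def Spec_art_py (names : List String) (predecessor_lists : List (Int × List Int)) (successor_lists : List (Int × List Int)) (max_width : Int) (out : List String) : Prop := out = art_py_alt names predecessor_lists successor_lists max_width
instance (names : List String) (predecessor_lists : List (Int × List Int)) (successor_lists : List (Int × List Int)) (max_width : Int) (out : List String) : Decidable (Spec_art_py names predecessor_lists successor_lists max_width out) := by unfold Spec_art_py; infer_instance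

-- ===== CLAIM (what is proved, stated in full; the proofs are below) =====
def Claim_equal_art_py : Prop := ∀ (names : List String) (predecessor_lists : List (Int × List Int)) (successor_lists : List (Int × List Int)) (max_width : Int), Dom_art_py names predecessor_lists successor_lists max_width → Spec_art_py names predecessor_lists successor_lists max_width (art_py names predecessor_lists successor_lists max_width)

-- ===== LEMMAS AND PROOFS =====

-- the value `_above_has_successor_to_the_right` is about: max over the chained successor lists of rows < r
def pvChain (successor_lists : List (Int × List Int)) (r : Nat) : Option Int :=
  PySem.List.max? (((PySem.List.pyRange 0 (r : Int))).flatMap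
      (fun predecessor => (PySem.Dict.mk successor_lists).getD predecessor [])) (fun x => x)

theorem pv_foldl_max_shift (u : List Int) (a y : Int) :
    u.foldl max (max a y) = max a (u.foldl max y) := by
  induction u generalizing a y with
  | nil => rfl
  | cons z u ih =>
    show u.foldl max (max (max a y) z) = max a (u.foldl max (max y z))
    rw [max_assoc]; exact ih a (max y z)

theorem pv_max?_append (xs ys : List Int) :
    PySem.List.max? (xs ++ ys) (fun x => x) =
      (match PySem.List.max? ys (fun x => x) with
       | none => PySem.List.max? xs (fun x => x)
       | some m => match PySem.List.max? xs (fun x => x) with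
                   | none => some m
                   | some c => if m > c then some m else some c) := by
  have h0 : (PySem.List.max? ([] : List Int) (fun x => x)) = none :=
    (PySem.List.max?_eq_none_iff _ _).mpr rfl
  cases xs with
  | nil =>
    cases hy : PySem.List.max? ys (fun x => x) with
    | none => simp [hy, h0]
    | some m => simp [hy, h0]
  | cons x t =>
    cases ys with
    | nil => simp [PySem.List.max?_id_cons, h0]
    | cons y u =>
      rw [show (x :: t) ++ (y :: u) = x :: (t ++ (y :: u)) from rfl]
      rw [PySem.List.max?_id_cons, PySem.List.max?_id_cons, PySem.List.max?_id_cons]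
      have h1 : (t ++ (y :: u)).foldl max x = u.foldl max (max (t.foldl max x) y) := by
        rw [List.foldl_append]; rfl
      rw [h1, pv_foldl_max_shift]
      have hmx : max (t.foldl max x) (u.foldl max y) =
          (if u.foldl max y > t.foldl max x then u.foldl max y else t.foldl max x) := by
        split_ifs <;> omega
      simp only [hmx]
      split_ifs <;> rfl

theorem pvChain_succ (sl : List (Int × List Int)) (r : Nat) :
    pvChain sl (r + 1) =
      (match PySem.List.max? ((PySem.Dict.mk sl).getD (r : Int) []) (fun x => x) with
       | none => pvChain sl r
       | some m => match pvChain sl r with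
                   | none => some m
                   | some c => if m > c then some m else some c) := by
  unfold pvChain
  have hr : ((r + 1 : Nat) : Int) = (r : Int) + 1 := by push_cast; ring
  rw [hr, PySem.List.pyRange_one_succ_right (by positivity), List.flatMap_append]
  have : (([(r : Int)]).flatMap
      (fun predecessor => (PySem.Dict.mk sl).getD predecessor [])) =
      (PySem.Dict.mk sl).getD (r : Int) [] := by simp
  rw [this, pv_max?_append]

-- the prefix scan in B computes exactly pvChain at every index
theorem pvScan_spec (sl : List (Int × List Int)) (n : Nat) :
    (List.range n).foldl (fun (st : List (Option Int) × Option Int) (r : Nat) =>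
      (st.1 ++ [st.2],
       match PySem.List.max? ((PySem.Dict.mk sl).getD (r : Int) []) (fun x => x) with
       | none => st.2
       | some m => match st.2 with
                   | none => some m
                   | some c => if m > c then some m else some c)) ([], none)
    = ((List.range n).map (pvChain sl), pvChain sl n) := by
  induction n with
  | zero => rfl
  | succ n ih =>
    rw [List.range_succ, List.foldl_append, ih]
    simp only [List.foldl_cons, List.foldl_nil, List.map_append, List.map_cons, List.map_nil]
    exact congrArg _ (pvChain_succ sl n).symm

-- pvAbove is pvChain compared against col
theorem pvAbove_eq (sl : List (Int × List Int)) (row col : Nat) :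
    pvAbove (row : Int) (col : Int) sl =
      (match pvChain sl row with
       | some m => decide ((col : Int) < m)
       | none => false) := rfl

-- per-cell agreement of the two ports
theorem pvCell_eq (names : List String) (pl sl : List (Int × List Int))
    (col_widths : List Int) (n row col : Nat) (hrow : row < n) (hcol : col < n) :
    pvCellA names pl sl col_widths ((PySem.Dict.mk sl).getD (row : Int) []) row col =
    pvCellB names col_widths
      ((List.range n).map (fun (c : Nat) => (PySem.Dict.mk pl).getD (c : Int) []))
      (((List.range n).map (fun (c : Nat) => (PySem.Dict.mk pl).getD (c : Int) [])).map
        (fun p => PySem.List.min? p (fun x => x)))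
      (((List.range n).map (fun (c : Nat) => (PySem.Dict.mk pl).getD (c : Int) [])).map
        (fun p => PySem.Set.ofList p))
      (((List.range n).map (fun (r : Nat) =>
          PySem.List.max? ((PySem.Dict.mk sl).getD (r : Int) []) (fun x => x))).getD row none)
      (((List.range n).map (pvChain sl)).getD row none) row col := by
  have hpreds : ((List.range n).map (fun (c : Nat) => (PySem.Dict.mk pl).getD (c : Int) [])).getD col []
      = (PySem.Dict.mk pl).getD (col : Int) [] := PySem.List.getD_map_range _ n col [] hcol
  have hpm : (((List.range n).map (fun (c : Nat) => (PySem.Dict.mk pl).getD (c : Int) [])).map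
        (fun p => PySem.List.min? p (fun x => x))).getD col none
      = PySem.List.min? ((PySem.Dict.mk pl).getD (col : Int) []) (fun x => x) := by
    rw [List.map_map]
    exact PySem.List.getD_map_range _ n col none hcol
  have hps : (((List.range n).map (fun (c : Nat) => (PySem.Dict.mk pl).getD (c : Int) [])).map
        (fun p => PySem.Set.ofList p)).getD col PySem.Set.empty
      = PySem.Set.ofList ((PySem.Dict.mk pl).getD (col : Int) []) := by
    rw [List.map_map]
    exact PySem.List.getD_map_range _ n col PySem.Set.empty hcol
  have hsm : (((List.range n).map (fun (r : Nat) =>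
        PySem.List.max? ((PySem.Dict.mk sl).getD (r : Int) []) (fun x => x))).getD row none)
      = PySem.List.max? ((PySem.Dict.mk sl).getD (row : Int) []) (fun x => x) :=
    PySem.List.getD_map_range _ n row none hrow
  have hpf : ((List.range n).map (pvChain sl)).getD row none = pvChain sl row :=
    PySem.List.getD_map_range _ n row none hrow
  unfold pvCellA pvCellB
  dsimp only
  rw [hpreds, hpm, hps, hsm, hpf, pvAbove_eq]
  set p := (PySem.Dict.mk pl).getD (col : Int) [] with hp
  set s := (PySem.Dict.mk sl).getD (row : Int) [] with hs
  have hmem : (decide (((row : Nat) : Int) ∈ PySem.Set.ofList p)) = p.contains ((row : Nat) : Int) := by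
    simp [PySem.Set.mem_ofList]
  have hminbr : (!p.isEmpty &&
      (match PySem.List.min? p (fun x => x) with
       | some m => decide (m < (row : Int)) | none => false))
      = (match PySem.List.min? p (fun x => x) with
         | some m => decide (m < (row : Int)) | none => false) := by
    cases hm : PySem.List.min? p (fun x => x) with
    | none => simp
    | some m =>
      have hpne : p ≠ [] := by
        intro h
        rw [h, (PySem.List.min?_eq_none_iff ([] : List Int) (fun x => x)).mpr rfl] at hm
        exact absurd hm (by simp)
      simp [hpne]
  have hmaxbr : (!s.isEmpty &&
      (match PySem.List.max? s (fun x => x) with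
       | some m => decide ((col : Int) < m) | none => false))
      = (match PySem.List.max? s (fun x => x) with
         | some m => decide ((col : Int) < m) | none => false) := by
    cases hm : PySem.List.max? s (fun x => x) with
    | none => simp
    | some m =>
      have hsne : s ≠ [] := by
        intro h
        rw [h, (PySem.List.max?_eq_none_iff ([] : List Int) (fun x => x)).mpr rfl] at hm
        exact absurd hm (by simp)
      simp [hsne]
  have hne : (if s ≠ [] then ("-" : String)
        else if (match pvChain sl row with
                 | some m => decide ((col : Int) < m) | none => false) then " " else "")
      = (match PySem.List.max? s (fun x => x) with
         | some _ => "-"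
         | none => match pvChain sl row with
                   | some m => if (col : Int) < m then " " else ""
                   | none => "") := by
    cases hm : PySem.List.max? s (fun x => x) with
    | none =>
      have hsnil : s = [] := (PySem.List.max?_eq_none_iff s _).mp hm
      cases hc : pvChain sl row with
      | none => simp [hsnil]
      | some m => simp [hsnil]
    | some m =>
      have hsne : s ≠ [] := by
        intro h
        rw [h, (PySem.List.max?_eq_none_iff ([] : List Int) (fun x => x)).mpr rfl] at hm
        exact absurd hm (by simp)
      simp [hsne]
  rw [hmem, hminbr, hmaxbr, hne]

-- ===== VERDICT (by name: the statement is the Claim_ definition above) =====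
theorem art_py_spec : Claim_equal_art_py := by
  intro names pl sl mw _
  unfold Spec_art_py art_py art_py_alt
  dsimp only
  rw [pvScan_spec]
  apply PySem.List.foldl_congr_mem
  intro acc row hrow
  apply PySem.List.foldl_congr_mem
  intro a col hcol
  rw [pvCell_eq names pl sl _ names.length row col (List.mem_range.mp hrow) (List.mem_range.mp hcol)]
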